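-- pv_equiv track=rewrite | github.com/fatima-tourk/Ankle_Exo | data_loading_util.py | manipulate_ss_col
-- ===== SOURCE A (Python) =====
-- def manipulate_ss_col(ss_col):
--     flag = 0  # Flags: 0 -> looking for first positive, 1 -> searching for 1, 2 -> holding 1, 3 -> setting to -1, 4 -> holding 0
--     counter = 0
--     first_positive_found = False  # Indicator for the first positive value
--
--     for i in range(len(ss_col)):
--         if not first_positive_found:
--             if ss_col[i] > 0:
--                 first_positive_found = True
--                 flag = 1  # Start looking for the next 1
--             else:
--                 ss_col[i] = -1  # Set to -1 until the first positive value is found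
--         else:
--             if flag == 1 and ss_col[i] == 1:
--                 # When 1 is found, start holding at 1
--                 flag = 2
--                 counter = 1
--             elif flag == 2:
--                 # Hold 1 for 15 points
--                 if counter < 15:
--                     ss_col[i] = 1
--                     counter += 1
--                 else:
--                     # Then go to -1 for the next 10 points
--                     flag = 3
--                     counter = 1
--                     ss_col[i] = -1
--             elif flag == 3:
--                 # Hold -1 for 10 points
--                 if counter < 10:
--                     ss_col[i] = -1
--                     counter += 1
--                 else:
--                     # Then go back to 0 and start looking for 1 again
--                     flag = 4
--                     counter = 0
--             elif flag == 4 and ss_col[i] != 0: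
--                 # As soon as the value starts increasing, start looking for 1 again
--                 flag = 1
--
--     return ss_col
-- ===== SOURCE B (Python) =====
-- def manipulate_ss_col(ss_col):
--     n = len(ss_col)
--     i = 0
--     # leading non-positives become -1; the first positive is left as-is
--     while i < n and ss_col[i] <= 0:
--         ss_col[i] = -1
--         i += 1
--     if i < n:
--         i += 1  # step past the first positive value, unchanged
--         while i < n:
--             # find the next trigger value 1 (the trigger itself stays unchanged)
--             while i < n and ss_col[i] != 1:
--                 i += 1
--             if i >= n:
--                 break
--             i += 1
--             # hold 1 for the next 14 samples
--             for _ in range(14):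
--                 if i >= n:
--                     break
--                 ss_col[i] = 1
--                 i += 1
--             # then -1 for the next 10 samples
--             for _ in range(10):
--                 if i >= n:
--                     break
--                 ss_col[i] = -1
--                 i += 1
--             # one sample is consumed by the state transition, unchanged
--             i += 1
--             # skip zeros until a nonzero sample re-arms the search
--             while i < n and ss_col[i] == 0:
--                 i += 1
--             i += 1  # the re-arming sample itself stays unchanged
--     return ss_col
-- ===== Notes on version B (the rewrite author's own statement) =====
-- stated objective: alternative
-- what changed: Replaced the per-element flag/counter state machine by an explicit index-advancing while loop with separate phases (leading fill, trigger search, fixed-length 1-block and -1-block writes, zero skipping), keeping only the current index.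
import Mathlib
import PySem

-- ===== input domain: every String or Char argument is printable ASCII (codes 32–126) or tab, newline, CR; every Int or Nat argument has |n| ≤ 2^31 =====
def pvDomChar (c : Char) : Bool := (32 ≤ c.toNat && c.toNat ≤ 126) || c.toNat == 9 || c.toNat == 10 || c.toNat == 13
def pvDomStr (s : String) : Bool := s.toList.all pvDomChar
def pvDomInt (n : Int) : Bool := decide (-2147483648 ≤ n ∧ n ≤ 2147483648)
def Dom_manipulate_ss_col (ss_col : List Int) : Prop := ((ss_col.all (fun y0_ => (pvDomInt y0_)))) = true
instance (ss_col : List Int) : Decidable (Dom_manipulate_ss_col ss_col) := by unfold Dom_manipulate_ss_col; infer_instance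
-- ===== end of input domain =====

-- B rewrites A's flag/counter state machine as an explicit phase-structured scan (same O(n) cost);
-- both Pythons mutate the argument list in place identically, and the equivalence proved is about the return value.

-- ===== PORT A =====
-- A reads/writes only position i in iteration i, so the for-loop over indices is
-- transliterated as a structural recursion producing the list front-to-back while
-- carrying A's exact state (flag, counter, first_positive_found).
def manipulateGoA : List Int → Int → Int → Bool → List Int
  | [], _, _, _ => []
  | x :: xs, flag, counter, fpf =>
    if fpf = false then
      if x > 0 then x :: manipulateGoA xs 1 counter true
      else (-1) :: manipulateGoA xs flag counter false
    else
      if flag = 1 ∧ x = 1 then x :: manipulateGoA xs 2 1 true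
      else if flag = 2 then
        if counter < 15 then 1 :: manipulateGoA xs 2 (counter + 1) true
        else (-1) :: manipulateGoA xs 3 1 true
      else if flag = 3 then
        if counter < 10 then (-1) :: manipulateGoA xs 3 (counter + 1) true
        else x :: manipulateGoA xs 4 0 true
      else if flag = 4 ∧ x ≠ 0 then x :: manipulateGoA xs 1 counter true
      else x :: manipulateGoA xs flag counter true

def manipulate_ss_col (ss_col : List Int) : List Int :=
  manipulateGoA ss_col 0 0 false

-- ===== PORT B =====
-- Transliteration of Source B's index-advancing while loops: each while/for loop becomes
-- one function consuming the remainder of the list (index advance = moving to the tail).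
mutual
  -- leading while: non-positives become -1; first positive left as-is, then search
  def bLead : List Int → List Int
    | [] => []
    | x :: xs => if x ≤ 0 then (-1) :: bLead xs else x :: bSearch xs
  termination_by xs => (xs.length, 0)
  -- inner while: find the next 1 (left unchanged), then write the 14-sample 1-block
  def bSearch : List Int → List Int
    | [] => []
    | x :: xs => if x ≠ 1 then x :: bSearch xs else x :: bOnes 14 xs
  termination_by xs => (xs.length, 0)
  -- for _ in range(14): write 1
  def bOnes : Nat → List Int → List Int
    | _, [] => []
    | 0, xs => bNegs 10 xs
    | n + 1, _ :: xs => 1 :: bOnes n xs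
  termination_by _ xs => (xs.length, 1)
  -- for _ in range(10): write -1; then one transition sample unchanged, then skip zeros
  def bNegs : Nat → List Int → List Int
    | _, [] => []
    | 0, x :: xs => x :: bSkip xs
    | n + 1, _ :: xs => (-1) :: bNegs n xs
  termination_by _ xs => (xs.length, 0)
  -- while zeros: skip; nonzero sample re-arms the search (itself unchanged)
  def bSkip : List Int → List Int
    | [] => []
    | x :: xs => if x = 0 then x :: bSkip xs else x :: bSearch xs
  termination_by xs => (xs.length, 0)
end

def manipulate_ss_col_alt (ss_col : List Int) : List Int :=
  bLead ss_col

-- ===== PRECONDITION & SPEC =====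
def Spec_manipulate_ss_col (ss_col : List Int) (out : List Int) : Prop := out = manipulate_ss_col_alt ss_col
instance (ss_col : List Int) (out : List Int) : Decidable (Spec_manipulate_ss_col ss_col out) := by unfold Spec_manipulate_ss_col; infer_instance

-- ===== CLAIM (what is proved, stated in full; the proofs are below) =====
def Claim_equal_manipulate_ss_col : Prop := ∀ (ss_col : List Int), Dom_manipulate_ss_col ss_col → Spec_manipulate_ss_col ss_col (manipulate_ss_col ss_col)

-- ===== LEMMAS AND PROOFS =====

-- Joint invariant: A's state machine after the first positive matches B's phases.
theorem goA_phases (xs : List Int) :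
    (∀ c : Int, manipulateGoA xs 1 c true = bSearch xs) ∧
    (∀ c : Int, 1 ≤ c → c ≤ 15 → manipulateGoA xs 2 c true = bOnes (15 - c).toNat xs) ∧
    (∀ c : Int, 1 ≤ c → c ≤ 10 → manipulateGoA xs 3 c true = bNegs (10 - c).toNat xs) ∧
    (∀ c : Int, manipulateGoA xs 4 c true = bSkip xs) := by
  induction xs with
  | nil => simp [manipulateGoA, bSearch, bOnes, bNegs, bSkip]
  | cons x xs ih =>
    obtain ⟨ih1, ih2, ih3, ih4⟩ := ih
    refine ⟨?_, ?_, ?_, ?_⟩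
    · intro c
      by_cases hx : x = 1
      · have h14 : ((15 : Int) - 1).toNat = 14 := by decide
        simp [manipulateGoA, bSearch, hx, h14 ▸ ih2 1 (by omega) (by omega)]
      · simp [manipulateGoA, bSearch, hx, ih1 c]
    · intro c h1 h15
      by_cases hc : c < 15
      · have hk : (15 - c).toNat = ((15 - (c + 1)).toNat) + 1 := by omega
        simp only [manipulateGoA, hk, bOnes]
        simp [hc, ih2 (c + 1) (by omega) (by omega)]
      · have hc15 : c = 15 := by omega
        have hk : ((15 : Int) - 15).toNat = 0 := by decide
        have hn : ((10 : Int) - 1).toNat = 9 := by decide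
        simp only [manipulateGoA, hc15, hk, bOnes, bNegs]
        simp [hn ▸ ih3 1 (by omega) (by omega)]
    · intro c h1 h10
      by_cases hc : c < 10
      · have hk : (10 - c).toNat = ((10 - (c + 1)).toNat) + 1 := by omega
        simp only [manipulateGoA, hk, bNegs]
        simp [hc, ih3 (c + 1) (by omega) (by omega)]
      · have hc10 : c = 10 := by omega
        have hk : ((10 : Int) - 10).toNat = 0 := by decide
        simp only [manipulateGoA, hc10, hk, bNegs]
        simp [ih4 0]
    · intro c
      by_cases hx : x = 0
      · simp [manipulateGoA, bSkip, hx, ih4 c]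
      · simp [manipulateGoA, bSkip, hx, ih1 c]

theorem goA_lead (xs : List Int) : ∀ (flag c : Int), manipulateGoA xs flag c false = bLead xs := by
  induction xs with
  | nil => intro flag c; simp [manipulateGoA, bLead]
  | cons x xs ih =>
    intro flag c
    by_cases hx : x > 0
    · simp [manipulateGoA, bLead, hx, (goA_phases xs).1 c]
    · simp [manipulateGoA, bLead, hx, (by omega : x ≤ 0), ih flag c]

-- ===== VERDICT (by name: the statement is the Claim_ definition above) =====
theorem manipulate_ss_col_spec : Claim_equal_manipulate_ss_col := by
  intro ss_col _
  unfold Spec_manipulate_ss_col manipulate_ss_col manipulate_ss_col_alt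
  exact goA_lead ss_col 0 0
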